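-- pv_equiv track=rewrite | github.com/mnaeimaei/ClinicalEventKnowledgeGraphs | Script_for_Linux/Script14_DF_funcs.py | color_combine
-- ===== SOURCE A (Python) =====
-- def color_combine(combining_IDs_List):
--     k = -1
--     list2 = []
--     for i in range(len(combining_IDs_List)):
--         list1 = []
--         for j in range(len(combining_IDs_List[i])):
--             list1.append(k + 1)
--             k = k + 1
--         list2.append(list1)
--
--     return list2
-- ===== SOURCE B (Python) =====
-- def color_combine(combining_IDs_List):
--     offsets = [0]
--     for row in combining_IDs_List:
--         offsets.append(offsets[-1] + len(row))
--     return [list(range(a, b)) for a, b in zip(offsets, offsets[1:])]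
-- ===== Notes on version B (the rewrite author's own statement) =====
-- stated objective: alternative
-- what changed: Replaces the single running counter advanced per element by a two-phase decomposition: first a prefix-sum table of sublist lengths (offsets), then one pass turning each adjacent offset pair into list(range(start, end)).
import Mathlib
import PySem

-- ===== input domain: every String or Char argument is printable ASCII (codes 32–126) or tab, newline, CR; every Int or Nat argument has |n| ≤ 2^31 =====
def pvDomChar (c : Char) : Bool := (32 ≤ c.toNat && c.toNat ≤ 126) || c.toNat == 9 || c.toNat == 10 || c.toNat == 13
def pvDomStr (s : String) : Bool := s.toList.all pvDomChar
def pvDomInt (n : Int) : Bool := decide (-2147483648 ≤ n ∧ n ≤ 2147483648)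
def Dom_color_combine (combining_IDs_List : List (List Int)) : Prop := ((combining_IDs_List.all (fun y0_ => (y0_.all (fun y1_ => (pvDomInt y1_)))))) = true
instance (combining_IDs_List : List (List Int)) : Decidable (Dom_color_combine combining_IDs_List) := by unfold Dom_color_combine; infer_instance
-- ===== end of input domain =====

-- B replaces A's single running counter with a two-phase decomposition (prefix-sum offset table, then ranges); objective: alternative.


-- ===== PORT A =====
-- for i …: inner loop appends k+1 and increments k; state = (k, list2)
def color_combine (combining_IDs_List : List (List Int)) : List (List Int) :=
  (combining_IDs_List.foldl
    (fun (st : Int × List (List Int)) row =>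
      let inner := row.foldl (fun (s : Int × List Int) _ => (s.1 + 1, s.2 ++ [s.1 + 1])) (st.1, [])
      (inner.1, st.2 ++ [inner.2]))
    (-1, [])).2

-- ===== PORT B =====
-- phase 1: offset table (prefix sums of lengths, offsets.append(offsets[-1]+len(row)));
-- phase 2: zip offsets with its tail and make ranges
def color_combine_alt (combining_IDs_List : List (List Int)) : List (List Int) :=
  let offsets := combining_IDs_List.foldl
    (fun (acc : List Int) row => acc ++ [acc.getLastD 0 + (row.length : Int)]) [0]
  (offsets.zip offsets.tail).map (fun p => PySem.List.pyRange p.1 p.2 1)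

-- ===== PRECONDITION & SPEC =====
def Spec_color_combine (combining_IDs_List : List (List Int)) (out : List (List Int)) : Prop := out = color_combine_alt combining_IDs_List
instance (combining_IDs_List : List (List Int)) (out : List (List Int)) : Decidable (Spec_color_combine combining_IDs_List out) := by unfold Spec_color_combine; infer_instance

-- ===== CLAIM =====
def Claim_equal_color_combine : Prop := ∀ (combining_IDs_List : List (List Int)), Dom_color_combine combining_IDs_List → Spec_color_combine combining_IDs_List (color_combine combining_IDs_List)

-- ===== LEMMAS AND PROOFS =====

-- canonical description: consecutive ranges starting at s
def ccRanges (s : Int) : List (List Int) → List (List Int)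
  | [] => []
  | r :: rs => PySem.List.pyRange s (s + (r.length : Int)) 1 :: ccRanges (s + (r.length : Int)) rs

-- A's inner loop produces the range [k+1, k+1+len) appended to acc, and k advances by len
theorem cc_inner (row : List Int) : ∀ (k : Int) (acc : List Int),
    row.foldl (fun (s : Int × List Int) _ => (s.1 + 1, s.2 ++ [s.1 + 1])) (k, acc)
      = (k + (row.length : Int), acc ++ PySem.List.pyRange (k + 1) (k + 1 + (row.length : Int)) 1) := by
  induction row with
  | nil => intro k acc; simp [PySem.List.pyRange_one_eq_nil]
  | cons x xs ih =>
    intro k acc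
    simp only [List.foldl_cons, ih (k + 1) (acc ++ [k + 1]), List.length_cons,
      Nat.cast_add, Nat.cast_one, Prod.mk.injEq]
    refine ⟨by ring, ?_⟩
    have h : PySem.List.pyRange (k + 1) (k + 1 + ((xs.length : Int) + 1)) 1
        = (k + 1) :: PySem.List.pyRange (k + 1 + 1) (k + 1 + ((xs.length : Int) + 1)) 1 :=
      PySem.List.pyRange_one_cons (by omega)
    rw [List.append_assoc, h]
    simp only [List.singleton_append]
    ring_nf

-- A's outer fold
theorem cc_outer (l : List (List Int)) : ∀ (k : Int) (acc : List (List Int)),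
    l.foldl
      (fun (st : Int × List (List Int)) row =>
        let inner := row.foldl (fun (s : Int × List Int) _ => (s.1 + 1, s.2 ++ [s.1 + 1])) (st.1, [])
        (inner.1, st.2 ++ [inner.2]))
      (k, acc)
      = (k + ((l.map List.length).sum : Int), acc ++ ccRanges (k + 1) l) := by
  induction l with
  | nil => intro k acc; simp [ccRanges]
  | cons r rs ih =>
    intro k acc
    simp only [List.foldl_cons, cc_inner r k [], List.nil_append, ih, Prod.mk.injEq,
      List.map_cons, List.sum_cons, Nat.cast_add]
    refine ⟨by ring, ?_⟩
    simp only [ccRanges, List.append_assoc, List.singleton_append]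
    ring_nf

-- B's offset table starting from pre ++ [s]
def ccOffs (s : Int) : List (List Int) → List Int
  | [] => [s]
  | r :: rs => s :: ccOffs (s + (r.length : Int)) rs

theorem cc_offs (l : List (List Int)) : ∀ (pre : List Int) (s : Int),
    l.foldl (fun (acc : List Int) row => acc ++ [acc.getLastD 0 + (row.length : Int)]) (pre ++ [s])
      = pre ++ ccOffs s l := by
  induction l with
  | nil => intro pre s; simp [ccOffs]
  | cons r rs ih =>
    intro pre s
    simp only [List.foldl_cons, List.getLastD_concat]
    rw [List.append_assoc, List.singleton_append]
    have := ih (pre ++ [s]) (s + (r.length : Int))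
    rw [List.append_assoc, List.singleton_append] at this
    rw [this]
    simp [ccOffs]

theorem cc_zip (l : List (List Int)) : ∀ (s : Int),
    ((ccOffs s l).zip (ccOffs s l).tail).map (fun p => PySem.List.pyRange p.1 p.2 1)
      = ccRanges s l := by
  induction l with
  | nil => intro s; simp [ccOffs, ccRanges]
  | cons r rs ih =>
    intro s
    cases rs with
    | nil => simp [ccOffs, ccRanges]
    | cons r2 rs2 =>
      simp only [ccOffs, ccRanges, List.tail_cons, List.zip_cons_cons, List.map_cons]
      exact congrArg _ (ih (s + (r.length : Int)))

-- ===== VERDICT =====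
theorem color_combine_spec : Claim_equal_color_combine := by
  intro l _
  unfold Spec_color_combine color_combine color_combine_alt
  have hb := cc_offs l [] 0
  simp only [List.nil_append] at hb
  rw [hb, cc_zip]
  rw [cc_outer l (-1) []]
  simp
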